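-- pv_equiv track=rewrite | github.com/COMHIS/article_2019_early_modern_canon | code/estclibs_py/actor_stats.py | get_actor_primary_role
-- ===== SOURCE A (Python) =====
-- from collections import Counter
--
-- def get_actor_primary_role(actor_id, actorlinks_by_actor_id):
--     this_actor_links = actorlinks_by_actor_id[actor_id]
--     all_roles = []
--     for actorlink in this_actor_links:
--         link_roles = actorlink['actor_roles_all'].split("; ")
--         all_roles.extend(link_roles)
--     counts = Counter(all_roles)
--     most_common_role = counts.most_common(1)[0][0]
--     # if most common role is "unknown" and there are other roles, pick the
--     # second most common
--     if most_common_role == "unknown" and len(counts) > 1: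
--         most_common_role = counts.most_common(2)[1][0]
--     return most_common_role
-- ===== SOURCE B (Python) =====
-- def get_actor_primary_role(actor_id, actorlinks_by_actor_id):
--     # one dict-counting pass over the links, then a single linear scan of the
--     # counts that tracks the best non-"unknown" role (strict > keeps first-seen
--     # order on ties, matching Counter.most_common's stable ordering)
--     counts = {}
--     for actorlink in actorlinks_by_actor_id[actor_id]:
--         for role in actorlink['actor_roles_all'].split("; "):
--             counts[role] = counts.get(role, 0) + 1
--     best = None
--     for role, n in counts.items():
--         if role != "unknown" and (best is None or n > best[1]):
--             best = (role, n)
--     return best[0] if best is not None else "unknown"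
-- ===== Notes on version B (the rewrite author's own statement) =====
-- stated objective: alternative
-- what changed: B replaces A's materialised all_roles list + Counter.most_common sort-based selection by a single dict-counting pass over the links followed by one linear scan of the counts that tracks the best non-'unknown' role (strict '>' preserves most_common's first-seen tie-breaking), with a plain 'unknown' fallback when no other role exists.
import Mathlib
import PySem

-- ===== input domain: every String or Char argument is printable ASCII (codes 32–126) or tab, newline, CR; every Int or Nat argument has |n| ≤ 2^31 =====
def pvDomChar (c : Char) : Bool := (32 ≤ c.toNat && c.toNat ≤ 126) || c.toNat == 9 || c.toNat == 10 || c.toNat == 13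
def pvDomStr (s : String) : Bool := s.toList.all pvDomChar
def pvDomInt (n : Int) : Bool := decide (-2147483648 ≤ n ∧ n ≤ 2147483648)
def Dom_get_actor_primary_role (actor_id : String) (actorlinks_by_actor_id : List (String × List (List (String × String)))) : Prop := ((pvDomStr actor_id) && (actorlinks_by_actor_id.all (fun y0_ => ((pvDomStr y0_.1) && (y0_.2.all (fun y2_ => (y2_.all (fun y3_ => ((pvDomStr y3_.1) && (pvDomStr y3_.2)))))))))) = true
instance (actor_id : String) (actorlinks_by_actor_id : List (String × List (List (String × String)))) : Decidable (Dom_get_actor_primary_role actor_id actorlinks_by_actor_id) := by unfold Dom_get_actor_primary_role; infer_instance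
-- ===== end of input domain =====

-- B replaces A's sort-based Counter.most_common selection by one dict-counting pass over the
-- links followed by a single linear scan of the counts (strict '>' keeps first-seen ties):
-- objective 'alternative' — no materialised all_roles list and no sort, same exact result.

-- ===== PORT A =====
def get_actor_primary_role (actor_id : String) (actorlinks_by_actor_id : List (String × List (List (String × String)))) : String :=
  let this_actor_links := ((PySem.Dict.mk actorlinks_by_actor_id).get? actor_id).getD []
  let all_roles := this_actor_links.foldl
    (fun all_roles actorlink =>
      all_roles ++ (PySem.Str.split? (((PySem.Dict.mk actorlink).get? "actor_roles_all").getD "") "; ").getD [])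
    []
  let counts := PySem.Dict.counter all_roles
  let mc := PySem.List.sorted counts.items (fun kv => kv.2) true
  let most_common_role := (PySem.List.pyGetD mc 0 ("", 0)).1
  if most_common_role == "unknown" && decide (1 < counts.size) then
    (PySem.List.pyGetD mc 1 ("", 0)).1
  else
    most_common_role

-- ===== PORT B =====
def get_actor_primary_role_alt (actor_id : String) (actorlinks_by_actor_id : List (String × List (List (String × String)))) : String :=
  let counts := (((PySem.Dict.mk actorlinks_by_actor_id).get? actor_id).getD []).foldl
    (fun counts actorlink =>
      ((PySem.Str.split? (((PySem.Dict.mk actorlink).get? "actor_roles_all").getD "") "; ").getD []).foldl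
        (fun counts role => counts.insert role (counts.getD role 0 + 1)) counts)
    (PySem.Dict.empty : PySem.Dict String Int)
  let best := counts.items.foldl
    (fun (best : Option (String × Int)) kv =>
      if (kv.1 != "unknown") && (match best with | none => true | some p => decide (p.2 < kv.2)) then
        some kv
      else best)
    none
  match best with
  | some p => p.1
  | none => "unknown"

-- ===== PRECONDITION & SPEC =====
-- Pre_ excludes exactly the inputs where the Python A raises: actor_id missing from the outer
-- dict (KeyError), an actor with an empty link list (IndexError from most_common(1)[0]), and a
-- link without the 'actor_roles_all' key (KeyError).
def Pre_get_actor_primary_role (actor_id : String) (actorlinks_by_actor_id : List (String × List (List (String × String)))) : Prop :=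
  ((PySem.Dict.mk actorlinks_by_actor_id).get? actor_id).isSome = true ∧
  ((PySem.Dict.mk actorlinks_by_actor_id).get? actor_id).getD [] ≠ [] ∧
  ∀ link ∈ ((PySem.Dict.mk actorlinks_by_actor_id).get? actor_id).getD [],
    ((PySem.Dict.mk link).get? "actor_roles_all").isSome = true
instance (actor_id : String) (actorlinks_by_actor_id : List (String × List (List (String × String)))) : Decidable (Pre_get_actor_primary_role actor_id actorlinks_by_actor_id) := by unfold Pre_get_actor_primary_role; infer_instance

def pvWitness_get_actor_primary_role : String × (List (String × List (List (String × String)))) :=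
  ("a", [("a", [[("actor_roles_all", "unknown; author")], [("actor_roles_all", "author")]])])

def Spec_get_actor_primary_role (actor_id : String) (actorlinks_by_actor_id : List (String × List (List (String × String)))) (out : String) : Prop := out = get_actor_primary_role_alt actor_id actorlinks_by_actor_id
instance (actor_id : String) (actorlinks_by_actor_id : List (String × List (List (String × String)))) (out : String) : Decidable (Spec_get_actor_primary_role actor_id actorlinks_by_actor_id out) := by unfold Spec_get_actor_primary_role; infer_instance

-- ===== CLAIM (what is proved, stated in full; the proofs are below) =====
def Claim_equal_get_actor_primary_role : Prop := ∀ (actor_id : String) (actorlinks_by_actor_id : List (String × List (List (String × String)))), Dom_get_actor_primary_role actor_id actorlinks_by_actor_id → Pre_get_actor_primary_role actor_id actorlinks_by_actor_id → Spec_get_actor_primary_role actor_id actorlinks_by_actor_id (get_actor_primary_role actor_id actorlinks_by_actor_id)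

-- ===== LEMMAS AND PROOFS =====

-- first element attaining the maximal count (strict '<' running maximum, first-seen on ties)
def pvFM (t : List (String × Int)) (b : String × Int) : String × Int :=
  t.foldl (fun b x => if b.2 < x.2 then x else b) b

-- the comparison used by sorted(…, key=itemgetter(1), reverse=True)
def pvBf (a b : String × Int) : Bool := decide (b.2 < a.2)

-- B's scanning step
def pvStep (best : Option (String × Int)) (kv : String × Int) : Option (String × Int) :=
  if (kv.1 != "unknown") && (match best with | none => true | some p => decide (p.2 < kv.2)) then
    some kv
  else best

lemma pv_insertBy_cons (x y : String × Int) (ys : List (String × Int)) :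
    PySem.List.insertBy pvBf x (y :: ys) =
      if pvBf x y then x :: y :: ys else y :: PySem.List.insertBy pvBf x ys := by
  cases h : pvBf x y <;> simp [PySem.List.insertBy, h]

lemma pv_insertBy_front (x : String × Int) (zs : List (String × Int))
    (h : ∀ z ∈ zs, pvBf x z = true) : PySem.List.insertBy pvBf x zs = x :: zs := by
  cases zs with
  | nil => simp [PySem.List.insertBy]
  | cons z zs' => rw [pv_insertBy_cons, if_pos (h z (by simp))]

lemma pv_splitOn_go_ne_nil (sep : List Char) (fuel : Nat) (l cur : List Char) (acc : List (List Char)) :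
    PySem.Chars.splitOn.go sep fuel l cur acc ≠ [] := by
  induction fuel generalizing l cur acc with
  | zero => simp [PySem.Chars.splitOn.go]
  | succ n ih =>
    cases l with
    | nil => simp [PySem.Chars.splitOn.go]
    | cons c rest =>
      rw [PySem.Chars.splitOn.go]
      split
      · exact ih _ _ _
      · exact ih _ _ _

lemma pv_split_ne_nil (s : String) : (PySem.Str.split? s "; ").getD [] ≠ [] := by
  have h := pv_splitOn_go_ne_nil "; ".toList (s.toList.length + 1) s.toList [] []
  simp only [PySem.Str.split?, PySem.Chars.split?, PySem.Chars.splitOn]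
  rw [if_neg (by decide)]
  simpa using h

lemma pv_head_sorted (t : List (String × Int)) (a : String × Int) :
    ∃ tl, PySem.List.sorted (a :: t) (fun kv => kv.2) true = pvFM t a :: tl := by
  induction t using List.reverseRecOn with
  | nil => exact ⟨[], by simp [PySem.List.sorted, PySem.List.insertBy, pvFM]⟩
  | append_singleton t x ih =>
    obtain ⟨tl, htl⟩ := ih
    rw [PySem.List.sorted_rev_eq_foldl_insertBy] at htl ⊢
    rw [show a :: (t ++ [x]) = (a :: t) ++ [x] by simp, List.foldl_append, htl]
    have hfm : pvFM (t ++ [x]) a = if (pvFM t a).2 < x.2 then x else pvFM t a := by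
      simp only [pvFM, List.foldl_append, List.foldl_cons, List.foldl_nil]
    show ∃ tl', PySem.List.insertBy pvBf x (pvFM t a :: tl) = pvFM (t ++ [x]) a :: tl'
    rw [pv_insertBy_cons, hfm]
    by_cases hc : (pvFM t a).2 < x.2
    · rw [if_pos (by simp only [pvBf, decide_eq_true_eq]; exact hc), if_pos hc]
      exact ⟨pvFM t a :: tl, rfl⟩
    · rw [if_neg (by simp only [pvBf, decide_eq_true_eq]; exact hc), if_neg hc]
      exact ⟨_, rfl⟩

lemma pv_filter_insertBy_neg (p : String × Int → Bool) (x : String × Int)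
    (ys : List (String × Int)) (hx : p x = false) :
    (PySem.List.insertBy pvBf x ys).filter p = ys.filter p := by
  induction ys with
  | nil => simp [PySem.List.insertBy, hx]
  | cons y ys ih =>
    rw [pv_insertBy_cons]
    by_cases h : pvBf x y = true
    · simp [h, hx]
    · simp only [Bool.not_eq_true] at h
      simp [h, List.filter_cons, ih]

lemma pv_filter_insertBy (p : String × Int → Bool) (x : String × Int)
    (ys : List (String × Int)) (hx : p x = true)
    (hs : ys.Pairwise (fun a b => b.2 ≤ a.2)) :
    (PySem.List.insertBy pvBf x ys).filter p = PySem.List.insertBy pvBf x (ys.filter p) := by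
  induction ys with
  | nil => simp [PySem.List.insertBy, hx]
  | cons y ys ih =>
    rw [List.pairwise_cons] at hs
    obtain ⟨hy, hys⟩ := hs
    by_cases h : pvBf x y = true
    · have hlt : y.2 < x.2 := by simpa [pvBf] using h
      rw [pv_insertBy_cons, if_pos h,
          pv_insertBy_front x ((y :: ys).filter p) ?_]
      · rw [List.filter_cons, if_pos hx]
      · intro z hz
        rw [List.mem_filter] at hz
        rcases List.mem_cons.mp hz.1 with rfl | hz'
        · exact h
        · simp only [pvBf, decide_eq_true_eq]
          exact lt_of_le_of_lt (hy z hz') hlt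
    · by_cases hp : p y = true
      · rw [pv_insertBy_cons, if_neg h, List.filter_cons, if_pos hp, List.filter_cons,
            if_pos hp, ih hys, pv_insertBy_cons, if_neg h]
      · have hp' : p y = false := by simpa using hp
        rw [pv_insertBy_cons, if_neg h, List.filter_cons, if_neg hp, List.filter_cons,
            if_neg hp, ih hys]

lemma pv_sorted_snoc (M : List (String × Int)) (z : String × Int) :
    PySem.List.sorted (M ++ [z]) (fun kv => kv.2) true
      = PySem.List.insertBy pvBf z (PySem.List.sorted M (fun kv => kv.2) true) := by
  rw [PySem.List.sorted_rev_eq_foldl_insertBy, PySem.List.sorted_rev_eq_foldl_insertBy,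
      List.foldl_append, List.foldl_cons, List.foldl_nil]
  rfl

lemma pv_filter_sorted (L : List (String × Int)) (p : String × Int → Bool) :
    (PySem.List.sorted L (fun kv => kv.2) true).filter p =
      PySem.List.sorted (L.filter p) (fun kv => kv.2) true := by
  induction L using List.reverseRecOn with
  | nil => simp [PySem.List.sorted]
  | append_singleton L x ih =>
    by_cases hp : p x = true
    · have hf : (L ++ [x]).filter p = L.filter p ++ [x] := by simp [hp]
      rw [hf, pv_sorted_snoc, pv_sorted_snoc,
          pv_filter_insertBy p x _ hp (PySem.List.sorted_pairwise_rev L _), ih]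
    · have hp' : p x = false := by simpa using hp
      have hf : (L ++ [x]).filter p = L.filter p := by simp [hp']
      rw [hf, pv_sorted_snoc, pv_filter_insertBy_neg p x _ hp', ih]

lemma pv_scan_filter (L : List (String × Int)) (b : Option (String × Int)) :
    L.foldl pvStep b = (L.filter (fun kv => kv.1 != "unknown")).foldl pvStep b := by
  induction L generalizing b with
  | nil => rfl
  | cons kv L ih =>
    by_cases hk : (kv.1 != "unknown") = true
    · rw [List.foldl_cons, List.filter_cons, if_pos hk, List.foldl_cons, ih]
    · have hk' : (kv.1 != "unknown") = false := by simpa using hk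
      rw [List.foldl_cons, List.filter_cons, if_neg hk, ih]
      simp [pvStep, hk']

lemma pv_scan_some (t : List (String × Int)) (a : String × Int)
    (h : ∀ kv ∈ t, (kv.1 != "unknown") = true) :
    t.foldl pvStep (some a) = some (pvFM t a) := by
  induction t generalizing a with
  | nil => rfl
  | cons kv t ih =>
    have hkv := h kv (by simp)
    rw [List.foldl_cons]
    have hstep : pvStep (some a) kv = some (if a.2 < kv.2 then kv else a) := by
      by_cases hc : a.2 < kv.2
      · simp [pvStep, hkv, hc]
      · simp [pvStep, hkv, hc]
    rw [hstep, ih _ (fun z hz => h z (by simp [hz]))]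
    simp [pvFM]

-- the common selection lemma: A's sort-based pick equals B's linear scan, on any
-- nonempty items list with pairwise-distinct keys
lemma pv_main (L : List (String × Int)) (hne : L ≠ []) (hnd : (L.map Prod.fst).Nodup) :
    (let mc := PySem.List.sorted L (fun kv => kv.2) true
     let m := (PySem.List.pyGetD mc 0 ("", 0)).1
     if m == "unknown" && decide (1 < L.length) then (PySem.List.pyGetD mc 1 ("", 0)).1 else m)
    = (match L.foldl pvStep none with
       | some p => p.1
       | none => "unknown") := by
  obtain ⟨a, t, rfl⟩ := List.exists_cons_of_ne_nil hne
  obtain ⟨tl, hsort⟩ := pv_head_sorted t a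
  rw [pv_scan_filter]
  simp only [hsort]
  cases hF : (a :: t).filter (fun kv => kv.1 != "unknown") with
  | nil =>
    have hall : ∀ kv ∈ a :: t, kv.1 = "unknown" := by
      intro kv hkv
      have := List.filter_eq_nil_iff.mp hF kv hkv
      simpa using this
    have ht : t = [] := by
      cases t with
      | nil => rfl
      | cons x t' =>
        exfalso
        have ha := hall a (by simp)
        have hx := hall x (by simp)
        simp [List.map_cons, List.nodup_cons, ha, hx] at hnd
    subst ht
    have hlen := (PySem.List.sorted_perm [a] (fun kv : String × Int => kv.2) true).length_eq
    rw [hsort] at hlen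
    simp only [List.length_cons] at hlen
    have htl : tl = [] := by
      cases tl with
      | nil => rfl
      | cons c tl' => simp at hlen
    subst htl
    have ha := hall a (by simp)
    simp [pvFM, PySem.List.pyGetD, PySem.List.pyGet?, PySem.List.pyIdx?, ha]
  | cons b u =>
    have hbmem : b ∈ (a :: t).filter (fun kv => kv.1 != "unknown") := by rw [hF]; simp
    have hb : (b.1 != "unknown") = true := (List.mem_filter.mp hbmem).2
    have hu : ∀ kv ∈ u, (kv.1 != "unknown") = true := by
      intro kv hkv
      have hmem : kv ∈ (a :: t).filter (fun kv => kv.1 != "unknown") := by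
        rw [hF]; simp [hkv]
      exact (List.mem_filter.mp hmem).2
    rw [List.foldl_cons, show pvStep none b = some b by simp [pvStep, hb],
        pv_scan_some u b hu]
    obtain ⟨tl₂, hsF⟩ := pv_head_sorted u b
    have hfilt := pv_filter_sorted (a :: t) (fun kv => kv.1 != "unknown")
    rw [hF, hsF, hsort] at hfilt
    by_cases hm : (pvFM t a).1 = "unknown"
    · have hperm := ((PySem.List.sorted_perm (a :: t) (fun kv : String × Int => kv.2) true).map Prod.fst)
      rw [hsort] at hperm
      have hnds : ((pvFM t a :: tl).map Prod.fst).Nodup := hperm.nodup_iff.mpr hnd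
      simp only [List.map_cons, List.nodup_cons] at hnds
      have htlp : ∀ z ∈ tl, (z.1 != "unknown") = true := by
        intro z hz
        have hzne : z.1 ≠ "unknown" := by
          intro e
          exact hnds.1 (by rw [hm, ← e]; exact List.mem_map_of_mem hz)
        simp [hzne]
      rw [List.filter_cons, if_neg (by simp [hm]), List.filter_eq_self.mpr htlp] at hfilt
      have hlen := (PySem.List.sorted_perm (a :: t) (fun kv : String × Int => kv.2) true).length_eq
      rw [hsort, hfilt] at hlen
      simp only [List.length_cons] at hlen
      have h1 : 1 < (a :: t).length := by simp only [List.length_cons]; omega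
      rw [hfilt, PySem.List.pyGetD_ofNat', PySem.List.pyGetD_ofNat']
      simp only [List.getD_cons_zero, List.getD_cons_succ]
      rw [if_pos (by simp only [hm]; simp only [List.length_cons] at *; simp; omega)]
    · have hpm : ((pvFM t a).1 != "unknown") = true := by simp [hm]
      rw [List.filter_cons, if_pos hpm] at hfilt
      have hmb : pvFM t a = pvFM u b := by
        have := congrArg (fun l => l.head?) hfilt
        simpa using this
      have hbeq : ((pvFM t a).1 == "unknown") = false := by simp [hm]
      rw [PySem.List.pyGetD_ofNat']
      simp only [List.getD_cons_zero]
      rw [if_neg (by simp [hbeq]), hmb]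

lemma pv_items_ne_nil (roles : List String) (h : roles ≠ []) :
    (PySem.Dict.counter roles).items ≠ [] := by
  rw [PySem.Dict.items_counter]
  obtain ⟨r, rs, rfl⟩ := List.exists_cons_of_ne_nil h
  have hr : r ∈ PySem.Set.ofList (r :: rs) := (PySem.Set.mem_ofList _ _).mpr (by simp)
  intro hmap
  rw [List.map_eq_nil_iff] at hmap
  rw [hmap] at hr
  simp at hr

lemma pv_items_nodup (roles : List String) :
    ((PySem.Dict.counter roles).items.map Prod.fst).Nodup := by
  rw [PySem.Dict.items_counter, List.map_map]
  have hid : (Prod.fst ∘ fun k : String => (k, (List.count k roles : Int))) = id := rfl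
  rw [hid, List.map_id]
  exact PySem.Set.nodup_ofList roles

-- ===== VERDICT (by name: the statement is the Claim_ definition above) =====
theorem get_actor_primary_role_spec : Claim_equal_get_actor_primary_role := by
  intro actor_id al _ hpre
  obtain ⟨_, hlne, _⟩ := hpre
  unfold Spec_get_actor_primary_role get_actor_primary_role get_actor_primary_role_alt
  have hroles :
      (((PySem.Dict.mk al).get? actor_id).getD []).foldl
        (fun all_roles actorlink =>
          all_roles ++ (PySem.Str.split? (((PySem.Dict.mk actorlink).get? "actor_roles_all").getD "") "; ").getD [])
        []
      = (((PySem.Dict.mk al).get? actor_id).getD []).flatMap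
          (fun actorlink =>
            (PySem.Str.split? (((PySem.Dict.mk actorlink).get? "actor_roles_all").getD "") "; ").getD []) := by
    simpa using PySem.List.foldl_append_eq_flatMap
      (fun actorlink =>
        (PySem.Str.split? (((PySem.Dict.mk actorlink).get? "actor_roles_all").getD "") "; ").getD [])
      (((PySem.Dict.mk al).get? actor_id).getD []) []
  have hcounts :
      (((PySem.Dict.mk al).get? actor_id).getD []).foldl
        (fun counts actorlink =>
          ((PySem.Str.split? (((PySem.Dict.mk actorlink).get? "actor_roles_all").getD "") "; ").getD []).foldl
            (fun counts role => counts.insert role (counts.getD role 0 + 1)) counts)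
        (PySem.Dict.empty : PySem.Dict String Int)
      = PySem.Dict.counter
          ((((PySem.Dict.mk al).get? actor_id).getD []).flatMap
            (fun actorlink =>
              (PySem.Str.split? (((PySem.Dict.mk actorlink).get? "actor_roles_all").getD "") "; ").getD [])) := by
    rw [← PySem.Dict.foldl_insert_getD_add_one_eq_counter, List.foldl_flatMap]
  have hrne :
      (((PySem.Dict.mk al).get? actor_id).getD []).flatMap
        (fun actorlink =>
          (PySem.Str.split? (((PySem.Dict.mk actorlink).get? "actor_roles_all").getD "") "; ").getD []) ≠ [] := by
    obtain ⟨l, rest, hl⟩ := List.exists_cons_of_ne_nil hlne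
    rw [hl, List.flatMap_cons]
    intro hnil
    rw [List.append_eq_nil_iff] at hnil
    exact pv_split_ne_nil _ hnil.1
  have eqA := congrArg (fun rs : List String =>
    let counts := PySem.Dict.counter rs
    let mc := PySem.List.sorted counts.items (fun kv => kv.2) true
    let m := (PySem.List.pyGetD mc 0 ("", 0)).1
    if m == "unknown" && decide (1 < counts.size) then (PySem.List.pyGetD mc 1 ("", 0)).1 else m) hroles
  have eqB := congrArg (fun counts : PySem.Dict String Int =>
    match counts.items.foldl pvStep none with
    | some p => p.1
    | none => "unknown") hcounts
  exact eqA.trans ((pv_main _ (pv_items_ne_nil _ hrne) (pv_items_nodup _)).trans eqB.symm)
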